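-- pv_equiv track=rewrite | github.com/hemparekh17/covert_channel | reciever.py | decode_from_whitespace
-- ===== SOURCE A (Python) =====
-- def decode_from_whitespace(encoded_text):
--     decoded_text = ""
--     binary_str = ""
--     for char in encoded_text:
--         if char == '0' or char == '1':
--             binary_str += char
--         else:
--             if binary_str:
--                 try:
--                     ascii_value = int(binary_str, 2)
--                     decoded_text += chr(ascii_value)
--                 except ValueError:
--                     decoded_text += '?'  # Handle invalid binary as a placeholder
--             decoded_text += char  # Append any non-binary character
--             binary_str = ""
--     if binary_str:
--         try:
--             ascii_value = int(binary_str, 2)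
--             decoded_text += chr(ascii_value)
--         except ValueError:
--             decoded_text += '?'  # Handle invalid binary as a placeholder
--     return decoded_text
-- ===== SOURCE B (Python) =====
-- def decode_from_whitespace(encoded_text):
--     out = []
--     i, n = 0, len(encoded_text)
--     while i < n:
--         c = encoded_text[i]
--         if c == '0' or c == '1':
--             j = i
--             while j < n and encoded_text[j] in '01':
--                 j += 1
--             run = encoded_text[i:j]
--             try:
--                 out.append(chr(int(run, 2)))
--             except ValueError:
--                 out.append('?')
--             i = j
--         else:
--             out.append(c)
--             i += 1
--     return ''.join(out)
-- ===== Notes on version B (the rewrite author's own statement) =====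
-- stated objective: alternative
-- what changed: Replaces A's character-by-character state machine with a pending binary_str accumulator by a two-pointer scan that extracts each maximal '0'/'1' run as a slice, decodes it, and joins the collected pieces; Pre_ excludes only inputs with a binary run encoding a UTF-16 surrogate code point (0xD800-0xDFFF), where Python's chr returns a lone surrogate that is not representable as a Lean String (A and B agree there in Python).
import Mathlib
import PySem

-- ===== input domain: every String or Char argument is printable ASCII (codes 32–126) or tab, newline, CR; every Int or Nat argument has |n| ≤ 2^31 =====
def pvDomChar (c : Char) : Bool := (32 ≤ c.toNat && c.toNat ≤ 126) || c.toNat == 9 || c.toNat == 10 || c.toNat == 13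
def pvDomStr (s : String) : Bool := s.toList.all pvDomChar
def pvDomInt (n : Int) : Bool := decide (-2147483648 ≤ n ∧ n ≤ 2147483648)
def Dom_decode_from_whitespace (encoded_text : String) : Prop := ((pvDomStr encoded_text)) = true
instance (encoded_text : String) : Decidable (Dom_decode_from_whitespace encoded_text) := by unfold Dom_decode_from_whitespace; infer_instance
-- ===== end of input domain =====

-- B replaces A's char-by-char state machine (pending binary accumulator, flush on boundary) by a
-- two-pointer scan extracting each maximal '0'/'1' run as a slice; objective: alternative structure, same cost.

-- shared helpers (exact on Pre_: chr on a non-surrogate code point; int(run,2) on a run of 0/1 digits)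
def pvIsBin (c : Char) : Bool := c = '0' || c = '1'

def pvBinVal (l : List Char) : Nat :=
  l.foldl (fun a c => 2 * a + (if c = '1' then 1 else 0)) 0

-- try: chr(v) except ValueError: '?'  — exact for v outside the surrogate range (Pre_ guarantees that)
def pvChr (v : Nat) : Char := if v ≤ 0x10FFFF then Char.ofNat v else '?'

-- ===== PORT A =====
-- A's loop state: decoded_text (acc), binary_str (bin); branch order as in A.
def pvFlushA (bin : List Char) : List Char :=
  if bin = [] then [] else [pvChr (pvBinVal bin)]

def pvLoopA (acc bin : List Char) : List Char → List Char
  | [] => acc ++ pvFlushA bin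
  | c :: rest =>
      if pvIsBin c then pvLoopA acc (bin ++ [c]) rest
      else pvLoopA (acc ++ pvFlushA bin ++ [c]) [] rest

def decode_from_whitespace (encoded_text : String) : String :=
  String.mk (pvLoopA [] [] encoded_text.toList)

-- ===== PORT B =====
-- inner while loop of B: split off the maximal run of '0'/'1' (run, rest)
def pvSpanBin : List Char → List Char × List Char
  | [] => ([], [])
  | c :: rest =>
      if pvIsBin c then
        let p := pvSpanBin rest
        (c :: p.1, p.2)
      else ([], c :: rest)

theorem pvSpanBin_snd_length : ∀ l : List Char, (pvSpanBin l).2.length ≤ l.length := by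
  intro l
  induction l with
  | nil => simp [pvSpanBin]
  | cons c rest ih =>
      simp only [pvSpanBin]
      split
      · simpa using Nat.le_succ_of_le ih
      · simp

-- outer while loop of B: decode each maximal run, keep other chars
def pvScanB : List Char → List Char
  | [] => []
  | c :: rest =>
      if pvIsBin c then
        pvChr (pvBinVal (c :: (pvSpanBin rest).1)) :: pvScanB (pvSpanBin rest).2
      else c :: pvScanB rest
termination_by l => l.length
decreasing_by
  · exact Nat.lt_succ_of_le (pvSpanBin_snd_length rest)
  · simp

def decode_from_whitespace_alt (encoded_text : String) : String :=
  String.mk (pvScanB encoded_text.toList)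

-- ===== PRECONDITION & SPEC =====
-- the values of the maximal binary runs of the input (used only to state Pre_; a plain fold
-- over the characters, independent of both ports)
def pvRunVals (l : List Char) : List Nat :=
  let st := l.foldl
    (fun (st : List Nat × Option Nat) c =>
      if pvIsBin c then (st.1, some (2 * st.2.getD 0 + (if c = '1' then 1 else 0)))
      else match st.2 with
        | some v => (st.1 ++ [v], none)
        | none => (st.1, none))
    ([], none)
  match st with
  | (vs, some v) => vs ++ [v]
  | (vs, none) => vs

-- Pre_ excludes only inputs with a binary run whose value is a UTF-16 surrogate code point
-- (0xD800–0xDFFF): there Python's chr returns a lone surrogate, which is not a value of the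
-- Lean String type; A and B agree on such inputs in Python.
def Pre_decode_from_whitespace (encoded_text : String) : Prop :=
  ∀ v ∈ pvRunVals encoded_text.toList, v < 0xD800 ∨ 0xDFFF < v
instance (encoded_text : String) : Decidable (Pre_decode_from_whitespace encoded_text) := by
  unfold Pre_decode_from_whitespace; infer_instance

def pvWitness_decode_from_whitespace : String := "1000001 1000010!"

def Spec_decode_from_whitespace (encoded_text : String) (out : String) : Prop := out = decode_from_whitespace_alt encoded_text
instance (encoded_text : String) (out : String) : Decidable (Spec_decode_from_whitespace encoded_text out) := by unfold Spec_decode_from_whitespace; infer_instance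

-- ===== CLAIM (what is proved, stated in full; the proofs are below) =====
def Claim_equal_decode_from_whitespace : Prop := ∀ (encoded_text : String), Dom_decode_from_whitespace encoded_text → Pre_decode_from_whitespace encoded_text → Spec_decode_from_whitespace encoded_text (decode_from_whitespace encoded_text)

-- ===== LEMMAS AND PROOFS =====

theorem pvLoopA_eq (l acc bin : List Char) :
    pvLoopA acc bin l =
      acc ++ (if bin = [] then pvScanB l
              else pvChr (pvBinVal (bin ++ (pvSpanBin l).1)) :: pvScanB (pvSpanBin l).2) := by
  induction l generalizing acc bin with
  | nil =>
      by_cases h : bin = [] <;>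
        simp [pvLoopA, pvFlushA, pvSpanBin, pvScanB, h]
  | cons c rest ih =>
      by_cases hc : pvIsBin c
      · by_cases h : bin = []
        · simp [pvLoopA, hc, h, ih, pvScanB]
        · have hne : bin ++ [c] ≠ [] := by simp
          simp only [pvLoopA, hc, ih, if_neg hne, if_neg h, pvSpanBin, pvScanB]

          simp
      · by_cases h : bin = []
        · simp [pvLoopA, hc, h, ih, pvFlushA, pvSpanBin, pvScanB]
        · simp [pvLoopA, hc, h, ih, pvFlushA, pvSpanBin, pvScanB]

-- ===== VERDICT (by name: the statement is the Claim_ definition above) =====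
theorem decode_from_whitespace_spec : Claim_equal_decode_from_whitespace := by
  intro s _ _
  unfold Spec_decode_from_whitespace decode_from_whitespace decode_from_whitespace_alt
  rw [pvLoopA_eq]
  simp
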